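-- pv_equiv track=rewrite | github.com/priitpaasukene/eestipuzzle | check_if_fits.py | check_if_fits
-- ===== SOURCE A (Python) =====
-- def check_if_fits(piece, right=False, down=False ):
--     if not down:
--         if (piece[0][1] + right[1][0]) == 0:
--             return True
--         return False
--     if not right:
--         if (piece[1][1]+down[0][0]) == 0:
--             return True
--         return False
--     if check_if_fits(piece,False,down):
--         if check_if_fits(piece,right,False):
--             return True
--     return False
-- ===== SOURCE B (Python) =====
-- # Table-driven re-implementation: the constraints to check are described by a
-- # coordinate table; the neighbours to test (in A's evaluation order) are
-- # selected into a list, and one loop verifies each edge-sum with early exit.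
-- COORDS = {"down": ((1, 1), (0, 0)), "right": ((0, 1), (1, 0))}
--
-- def check_if_fits(piece, right=False, down=False):
--     nbrs = {"right": right, "down": down}
--     if not down:
--         order = ["right"]
--     elif not right:
--         order = ["down"]
--     else:
--         order = ["down", "right"]
--     for name in order:
--         (pi, pj), (ni, nj) = COORDS[name]
--         if piece[pi][pj] + nbrs[name][ni][nj] != 0:
--             return False
--     return True
-- ===== Notes on version B (the rewrite author's own statement) =====
-- stated objective: alternative
-- what changed: Replaces A's depth-1 recursion with flag juggling by a data-driven formulation: a coordinate table mapping each neighbour name to the edge indices it constrains, a computed check-order list, and one early-exit loop verifying each edge-sum.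
import Mathlib
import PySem

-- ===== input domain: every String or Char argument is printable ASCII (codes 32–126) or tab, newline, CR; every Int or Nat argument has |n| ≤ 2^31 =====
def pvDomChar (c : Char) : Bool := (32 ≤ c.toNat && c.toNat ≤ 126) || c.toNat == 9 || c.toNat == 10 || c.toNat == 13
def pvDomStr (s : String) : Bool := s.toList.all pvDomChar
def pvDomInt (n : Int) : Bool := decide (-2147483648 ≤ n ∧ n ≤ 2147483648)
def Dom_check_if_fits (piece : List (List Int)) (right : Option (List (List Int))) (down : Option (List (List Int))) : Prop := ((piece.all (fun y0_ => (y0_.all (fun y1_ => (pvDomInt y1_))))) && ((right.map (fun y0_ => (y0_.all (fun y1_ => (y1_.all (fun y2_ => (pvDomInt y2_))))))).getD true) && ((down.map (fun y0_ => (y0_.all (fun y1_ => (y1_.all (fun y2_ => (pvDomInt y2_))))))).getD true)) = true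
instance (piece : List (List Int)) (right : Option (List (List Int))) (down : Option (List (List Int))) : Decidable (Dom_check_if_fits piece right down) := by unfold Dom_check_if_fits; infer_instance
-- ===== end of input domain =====

-- B replaces A's depth-1 recursion by a table-driven loop: a coordinate table, a computed
-- check-order list, and one early-exit pass verifying each edge-sum (objective: simpler);
-- same values, A's raising inputs excluded by Pre_.
-- ===== PORT A =====
-- Python truthiness of an optional list (False/None and [] are falsy)
def pvTruthy (o : Option (List (List Int))) : Bool :=
  !(o.getD []).isEmpty

-- m[i][j] as Python computes it; default 0 is only reached where Python raises (excluded by Pre_)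
def pvIdx2 (m : Option (List (List Int))) (i j : Int) : Int :=
  (match m with
   | none => none
   | some l => (PySem.List.pyGet? l i).bind (fun row => PySem.List.pyGet? row j)).getD 0

def check_if_fits (piece : List (List Int)) (right : Option (List (List Int))) (down : Option (List (List Int))) : Bool :=
  if !pvTruthy down then
    (if pvIdx2 (some piece) 0 1 + pvIdx2 right 1 0 == 0 then true else false)
  else if !pvTruthy right then
    (if pvIdx2 (some piece) 1 1 + pvIdx2 down 0 0 == 0 then true else false)
  else
    if check_if_fits piece none down then
      if check_if_fits piece right none then true else false
    else false
termination_by (if pvTruthy right then 1 else 0) + (if pvTruthy down then 1 else 0)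
decreasing_by
  · rename_i hdG hrG
    simp [pvTruthy] at hdG hrG ⊢
    simp [hdG, hrG]
  · rename_i hdG hrG _
    simp [pvTruthy] at hdG hrG ⊢
    simp [hdG, hrG]

-- ===== PORT B =====
-- COORDS table: for each neighbour name, the piece-edge index and the neighbour-edge index
def pvCoords : PySem.Dict String ((Int × Int) × (Int × Int)) :=
  PySem.Dict.ofList [("down", ((1, 1), (0, 0))), ("right", ((0, 1), (1, 0)))]

-- the 'for name in order' loop with its early 'return False'
def pvAltLoop (piece : List (List Int)) (nbrs : PySem.Dict String (Option (List (List Int)))) :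
    List String → Bool
  | [] => true
  | name :: rest =>
    let c := (PySem.Dict.get? pvCoords name).getD ((0, 0), (0, 0))
    if pvIdx2 (some piece) c.1.1 c.1.2 + pvIdx2 ((PySem.Dict.get? nbrs name).getD none) c.2.1 c.2.2 ≠ 0 then
      false
    else
      pvAltLoop piece nbrs rest

def check_if_fits_alt (piece : List (List Int)) (right : Option (List (List Int))) (down : Option (List (List Int))) : Bool :=
  let nbrs : PySem.Dict String (Option (List (List Int))) :=
    PySem.Dict.ofList [("right", right), ("down", down)]
  let order : List String :=
    if !pvTruthy down then ["right"]
    else if !pvTruthy right then ["down"]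
    else ["down", "right"]
  pvAltLoop piece nbrs order

-- ===== PRECONDITION & SPEC =====
-- Pre_ excludes exactly the inputs where Python A raises (TypeError on a falsy neighbour it
-- still indexes, or IndexError on too-short rows), branch by branch with A's short-circuit.
def Pre_check_if_fits (piece : List (List Int)) (right : Option (List (List Int))) (down : Option (List (List Int))) : Prop :=
  if pvTruthy down = false then
    right.isSome ∧ 2 ≤ (right.getD []).length ∧ 1 ≤ ((right.getD []).getD 1 []).length ∧
      1 ≤ piece.length ∧ 2 ≤ (piece.getD 0 []).length
  else if pvTruthy right = false then
    1 ≤ ((down.getD []).getD 0 []).length ∧ 2 ≤ piece.length ∧ 2 ≤ (piece.getD 1 []).length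
  else
    1 ≤ ((down.getD []).getD 0 []).length ∧ 2 ≤ piece.length ∧ 2 ≤ (piece.getD 1 []).length ∧
      ((piece.getD 1 []).getD 1 0 + ((down.getD []).getD 0 []).getD 0 0 ≠ 0 ∨
        (2 ≤ (right.getD []).length ∧ 1 ≤ ((right.getD []).getD 1 []).length ∧
          2 ≤ (piece.getD 0 []).length))
instance (piece : List (List Int)) (right : Option (List (List Int))) (down : Option (List (List Int))) : Decidable (Pre_check_if_fits piece right down) := by unfold Pre_check_if_fits; infer_instance

def pvWitness_check_if_fits : List (List Int) × Option (List (List Int)) × Option (List (List Int)) :=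
  ([[0, 0], [0, 0]], some [[0], [0]], none)
def Spec_check_if_fits (piece : List (List Int)) (right : Option (List (List Int))) (down : Option (List (List Int))) (out : Bool) : Prop := out = check_if_fits_alt piece right down
instance (piece : List (List Int)) (right : Option (List (List Int))) (down : Option (List (List Int))) (out : Bool) : Decidable (Spec_check_if_fits piece right down out) := by unfold Spec_check_if_fits; infer_instance

-- ===== CLAIM (what is proved, stated in full; the proofs are below) =====
def Claim_equal_check_if_fits : Prop := ∀ (piece : List (List Int)) (right : Option (List (List Int))) (down : Option (List (List Int))), Dom_check_if_fits piece right down → Pre_check_if_fits piece right down → Spec_check_if_fits piece right down (check_if_fits piece right down)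

-- ===== LEMMAS AND PROOFS =====
-- the inner recursive calls of A evaluated one step
theorem pv_call_down (p : List (List Int)) (d : Option (List (List Int))) (hd : pvTruthy d = true) :
    check_if_fits p none d = (pvIdx2 (some p) 1 1 + pvIdx2 d 0 0 == 0) := by
  rw [check_if_fits]
  simp [pvTruthy] at hd
  simp [hd, pvTruthy, Bool.beq_eq_decide_eq]

theorem pv_call_right (p : List (List Int)) (r : Option (List (List Int))) :
    check_if_fits p r none = (pvIdx2 (some p) 0 1 + pvIdx2 r 1 0 == 0) := by
  rw [check_if_fits]
  simp [pvTruthy, Bool.beq_eq_decide_eq]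

theorem pv_nbrs_down (r d : Option (List (List Int))) :
    (PySem.Dict.ofList [("right", r), ("down", d)]).get? "down" = some d := by
  simp [PySem.Dict.ofList, PySem.Dict.update, PySem.Dict.insert, PySem.Dict.get?, PySem.Dict.empty]
theorem pv_nbrs_right (r d : Option (List (List Int))) :
    (PySem.Dict.ofList [("right", r), ("down", d)]).get? "right" = some r := by
  simp [PySem.Dict.ofList, PySem.Dict.update, PySem.Dict.insert, PySem.Dict.get?, PySem.Dict.empty]

theorem pv_coords_down : (PySem.Dict.get? pvCoords "down").getD ((0,0),(0,0)) = ((1,1),(0,0)) := by rfl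
theorem pv_coords_right : (PySem.Dict.get? pvCoords "right").getD ((0,0),(0,0)) = ((0,1),(1,0)) := by rfl

-- ===== VERDICT (by name: the statement is the Claim_ definition above) =====
theorem check_if_fits_spec : Claim_equal_check_if_fits := by
  intro piece right down _ _
  unfold Spec_check_if_fits check_if_fits_alt
  rw [check_if_fits]
  by_cases hd : pvTruthy down
  · by_cases hr : pvTruthy right
    · simp only [hd, hr, pv_call_down piece down hd, pv_call_right piece right, Bool.not_true,
        Bool.false_eq_true, if_false]
      by_cases h1 : pvIdx2 (some piece) 1 1 + pvIdx2 down 0 0 = 0 <;>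
        simp [pvAltLoop, pv_coords_down, pv_coords_right, pv_nbrs_down, pv_nbrs_right, h1]
    · simp [hd, hr, pvAltLoop, pv_coords_down, pv_coords_right, pv_nbrs_down, pv_nbrs_right, Bool.beq_eq_decide_eq]
  · simp [hd, pvAltLoop, pv_coords_down, pv_coords_right, pv_nbrs_down, pv_nbrs_right, Bool.beq_eq_decide_eq]
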